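-- pv_equiv track=rewrite | github.com/JMTassy/helen-conquest | helen_os_scaffold/helen_os/autoresearch_loop.py | _evaluate_gates
-- ===== SOURCE A (Python) =====
-- from typing import Any, Dict, List, Tuple
--
-- def _evaluate_gates(
--
--     final: str,
--     hypothesis: Dict[str, Any]
-- ) -> Tuple[List[str], List[str]]:
--     """Mechanical judge: evaluate all gates (deterministic predicates)"""
--     gates_passed = []
--     gates_failed = []
--
--     # GATE_SCHEMA: Is output well-formed?
--     if final and len(final) > 10:
--         gates_passed.append("GATE_SCHEMA")
--     else:
--         gates_failed.append("GATE_SCHEMA")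
--
--     # GATE_EVIDENCE: Does it reference artifacts/receipts?
--     if hypothesis.get("changes"):
--         gates_passed.append("GATE_EVIDENCE")
--     else:
--         gates_failed.append("GATE_EVIDENCE")
--
--     # GATE_AUTHORITY: No forbidden tokens in hypothesis or final?
--     forbidden = ["SHIP", "SEALED", "APPROVED", "FINAL"]
--     combined_content = (hypothesis.get("raw_content", "") + final).upper()
--     if not any(token in combined_content for token in forbidden):
--         gates_passed.append("GATE_AUTHORITY")
--     else:
--         gates_failed.append("GATE_AUTHORITY")
--
--     # GATE_DETERMINISM: Testable/reproducible?
--     if "test" in hypothesis["raw_content"].lower():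
--         gates_passed.append("GATE_DETERMINISM")
--     else:
--         gates_failed.append("GATE_DETERMINISM")
--
--     # GATE_APPEND_ONLY: No retroactive edits claimed?
--     combined_text = (hypothesis.get("raw_content", "") + final).lower()
--     if "edit" not in combined_text or "retroactive" not in combined_text:
--         gates_passed.append("GATE_APPEND_ONLY")
--     else:
--         gates_failed.append("GATE_APPEND_ONLY")
--
--     return gates_passed, gates_failed
-- ===== SOURCE B (Python) =====
-- GATES = ["GATE_SCHEMA", "GATE_EVIDENCE", "GATE_AUTHORITY",
--          "GATE_DETERMINISM", "GATE_APPEND_ONLY"]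
--
-- def _evaluate_gates(final, hypothesis):
--     def passes(name):
--         if name == "GATE_SCHEMA":
--             return len(final) > 10
--         if name == "GATE_EVIDENCE":
--             return bool(hypothesis.get("changes"))
--         if name == "GATE_AUTHORITY":
--             up = (hypothesis.get("raw_content", "") + final).upper()
--             return all(t not in up for t in ("SHIP", "SEALED", "APPROVED", "FINAL"))
--         if name == "GATE_DETERMINISM":
--             return "test" in hypothesis["raw_content"].lower()
--         if name == "GATE_APPEND_ONLY":
--             low = (hypothesis.get("raw_content", "") + final).lower()
--             return not ("edit" in low and "retroactive" in low)
--         return False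
--
--     def split(names):
--         if not names:
--             return [], []
--         p, f = split(names[1:])
--         head = names[0]
--         if passes(head):
--             return [head] + p, f
--         return p, [head] + f
--
--     return split(GATES)
-- ===== Notes on version B (the rewrite author's own statement) =====
-- stated objective: alternative
-- what changed: B replaces A's five sequential if/else append blocks by a name-to-predicate dispatcher passes(name) and a recursive split over the gate-name list that builds both result lists back-to-front (recurse on the tail, then cons the head onto the passed or failed list).
import Mathlib
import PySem

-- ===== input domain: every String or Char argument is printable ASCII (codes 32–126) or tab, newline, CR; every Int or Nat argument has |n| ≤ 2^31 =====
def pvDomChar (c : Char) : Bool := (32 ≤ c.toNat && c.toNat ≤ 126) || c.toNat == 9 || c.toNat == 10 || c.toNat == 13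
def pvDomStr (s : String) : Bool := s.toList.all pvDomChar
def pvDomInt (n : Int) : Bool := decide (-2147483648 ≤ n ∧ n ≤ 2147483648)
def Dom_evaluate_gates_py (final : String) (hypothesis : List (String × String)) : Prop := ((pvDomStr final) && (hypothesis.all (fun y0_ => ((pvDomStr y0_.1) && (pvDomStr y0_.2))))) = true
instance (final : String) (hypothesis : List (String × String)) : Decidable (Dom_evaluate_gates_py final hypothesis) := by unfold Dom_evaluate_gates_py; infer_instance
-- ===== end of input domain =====

-- ===== PORT A =====
-- B replaces A's sequential if/else append blocks by a name→predicate dispatcher and a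
-- recursive split over the gate-name list building both lists back-to-front; same values
-- everywhere A returns (A raises KeyError without a "raw_content" key — outside Pre_).
-- Python truthiness of hypothesis.get("changes"): key present with a non-empty value
def pyTruthy (o : Option String) : Bool :=
  match o with
  | none => false
  | some s => s != ""

def evaluate_gates_py (final : String) (hypothesis : List (String × String)) : List String × List String :=
  let gates_passed : List String := []
  let gates_failed : List String := []
  -- GATE_SCHEMA: `final and len(final) > 10` (truthiness of final first)
  let (gates_passed, gates_failed) :=
    if (!(final == "")) && decide (PySem.Str.len final > 10) then
      (gates_passed ++ ["GATE_SCHEMA"], gates_failed)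
    else (gates_passed, gates_failed ++ ["GATE_SCHEMA"])
  -- GATE_EVIDENCE
  let (gates_passed, gates_failed) :=
    if pyTruthy (hypothesis.lookup "changes") then (gates_passed ++ ["GATE_EVIDENCE"], gates_failed)
    else (gates_passed, gates_failed ++ ["GATE_EVIDENCE"])
  -- GATE_AUTHORITY
  let forbidden : List String := ["SHIP", "SEALED", "APPROVED", "FINAL"]
  let combined_content := PySem.Str.upper ((hypothesis.lookup "raw_content").getD "" ++ final)
  let (gates_passed, gates_failed) :=
    if !(forbidden.any (fun token => PySem.Str.isIn token combined_content)) then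
      (gates_passed ++ ["GATE_AUTHORITY"], gates_failed)
    else (gates_passed, gates_failed ++ ["GATE_AUTHORITY"])
  -- GATE_DETERMINISM: `hypothesis["raw_content"]` raises KeyError when absent — excluded by Pre_
  let (gates_passed, gates_failed) :=
    if PySem.Str.isIn "test" (PySem.Str.lower ((hypothesis.lookup "raw_content").getD "")) then
      (gates_passed ++ ["GATE_DETERMINISM"], gates_failed)
    else (gates_passed, gates_failed ++ ["GATE_DETERMINISM"])
  -- GATE_APPEND_ONLY
  let combined_text := PySem.Str.lower ((hypothesis.lookup "raw_content").getD "" ++ final)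
  let (gates_passed, gates_failed) :=
    if (!(PySem.Str.isIn "edit" combined_text)) || (!(PySem.Str.isIn "retroactive" combined_text)) then
      (gates_passed ++ ["GATE_APPEND_ONLY"], gates_failed)
    else (gates_passed, gates_failed ++ ["GATE_APPEND_ONLY"])
  (gates_passed, gates_failed)

-- ===== PORT B =====
-- B's dispatcher: answer each gate by name (raw_content indexing raises KeyError when absent — outside Pre_)
def altPasses (final : String) (hypothesis : List (String × String)) (name : String) : Bool :=
  if name == "GATE_SCHEMA" then decide (PySem.Str.len final > 10)
  else if name == "GATE_EVIDENCE" then pyTruthy (hypothesis.lookup "changes")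
  else if name == "GATE_AUTHORITY" then
    (["SHIP", "SEALED", "APPROVED", "FINAL"] : List String).all
      (fun t => !(PySem.Str.isIn t (PySem.Str.upper ((hypothesis.lookup "raw_content").getD "" ++ final))))
  else if name == "GATE_DETERMINISM" then
    PySem.Str.isIn "test" (PySem.Str.lower ((hypothesis.lookup "raw_content").getD ""))
  else if name == "GATE_APPEND_ONLY" then
    !(PySem.Str.isIn "edit" (PySem.Str.lower ((hypothesis.lookup "raw_content").getD "" ++ final)) &&
      PySem.Str.isIn "retroactive" (PySem.Str.lower ((hypothesis.lookup "raw_content").getD "" ++ final)))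
  else false

-- B's recursive split: recurse on the tail, then cons the head onto the passed or failed list
def altSplit (passes : String → Bool) : List String → List String × List String
  | [] => ([], [])
  | n :: rest =>
    let (p, f) := altSplit passes rest
    if passes n then (n :: p, f) else (p, n :: f)

def evaluate_gates_py_alt (final : String) (hypothesis : List (String × String)) : List String × List String :=
  altSplit (altPasses final hypothesis)
    ["GATE_SCHEMA", "GATE_EVIDENCE", "GATE_AUTHORITY", "GATE_DETERMINISM", "GATE_APPEND_ONLY"]

-- ===== PRECONDITION & SPEC =====
-- Pre_ excludes exactly the inputs where Python A raises KeyError: hypothesis without a "raw_content" key.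
def Pre_evaluate_gates_py (final : String) (hypothesis : List (String × String)) : Prop :=
  (hypothesis.lookup "raw_content").isSome
instance (final : String) (hypothesis : List (String × String)) : Decidable (Pre_evaluate_gates_py final hypothesis) := by unfold Pre_evaluate_gates_py; infer_instance

def pvWitness_evaluate_gates_py : String × (List (String × String)) :=
  ("a test sentence", [("raw_content", "run the test"), ("changes", "x")])

def Spec_evaluate_gates_py (final : String) (hypothesis : List (String × String)) (out : List String × List String) : Prop := out = evaluate_gates_py_alt final hypothesis
instance (final : String) (hypothesis : List (String × String)) (out : List String × List String) : Decidable (Spec_evaluate_gates_py final hypothesis out) := by unfold Spec_evaluate_gates_py; infer_instance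

-- ===== CLAIM (what is proved, stated in full; the proofs are below) =====
def Claim_equal_evaluate_gates_py : Prop := ∀ (final : String) (hypothesis : List (String × String)), Dom_evaluate_gates_py final hypothesis → Pre_evaluate_gates_py final hypothesis → Spec_evaluate_gates_py final hypothesis (evaluate_gates_py final hypothesis)

-- ===== LEMMAS AND PROOFS =====
-- Both sides as one function of the nine atomic gate booleans; checked by exhaustive case analysis.
theorem gates_core (g1 g2 a1 a2 a3 a4 g4 e1 e2 : Bool) :
    (let gates_passed : List String := []
     let gates_failed : List String := []
     let (gates_passed, gates_failed) :=
       if g1 then (gates_passed ++ ["GATE_SCHEMA"], gates_failed)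
       else (gates_passed, gates_failed ++ ["GATE_SCHEMA"])
     let (gates_passed, gates_failed) :=
       if g2 then (gates_passed ++ ["GATE_EVIDENCE"], gates_failed)
       else (gates_passed, gates_failed ++ ["GATE_EVIDENCE"])
     let (gates_passed, gates_failed) :=
       if !([a1, a2, a3, a4].any (fun x => x)) then (gates_passed ++ ["GATE_AUTHORITY"], gates_failed)
       else (gates_passed, gates_failed ++ ["GATE_AUTHORITY"])
     let (gates_passed, gates_failed) :=
       if g4 then (gates_passed ++ ["GATE_DETERMINISM"], gates_failed)
       else (gates_passed, gates_failed ++ ["GATE_DETERMINISM"])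
     let (gates_passed, gates_failed) :=
       if (!e1) || (!e2) then (gates_passed ++ ["GATE_APPEND_ONLY"], gates_failed)
       else (gates_passed, gates_failed ++ ["GATE_APPEND_ONLY"])
     ((gates_passed, gates_failed) : List String × List String))
    =
    altSplit
      (fun name =>
        if name == "GATE_SCHEMA" then g1
        else if name == "GATE_EVIDENCE" then g2
        else if name == "GATE_AUTHORITY" then [a1, a2, a3, a4].all (fun x => !x)
        else if name == "GATE_DETERMINISM" then g4
        else if name == "GATE_APPEND_ONLY" then !(e1 && e2)
        else false)
      ["GATE_SCHEMA", "GATE_EVIDENCE", "GATE_AUTHORITY", "GATE_DETERMINISM", "GATE_APPEND_ONLY"] := by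
  cases g1 <;> cases g2 <;> cases a1 <;> cases a2 <;> cases a3 <;> cases a4 <;>
    cases g4 <;> cases e1 <;> cases e2 <;> rfl

-- A's first gate also tests truthiness of `final`, which is implied by len(final) > 10.
theorem gate1_eq (final : String) :
    ((!(final == "")) && decide (PySem.Str.len final > 10)) = decide (PySem.Str.len final > 10) := by
  by_cases h : final = ""
  · subst h; rfl
  · simp [h]

-- ===== VERDICT (by name: the statement is the Claim_ definition above) =====
set_option maxHeartbeats 4000000 in
theorem evaluate_gates_py_spec : Claim_equal_evaluate_gates_py := by
  intro final hypothesis _ _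
  unfold Spec_evaluate_gates_py evaluate_gates_py evaluate_gates_py_alt altPasses
  rw [gate1_eq final]
  exact gates_core
    (decide (PySem.Str.len final > 10))
    (pyTruthy (hypothesis.lookup "changes"))
    (PySem.Str.isIn "SHIP" (PySem.Str.upper ((hypothesis.lookup "raw_content").getD "" ++ final)))
    (PySem.Str.isIn "SEALED" (PySem.Str.upper ((hypothesis.lookup "raw_content").getD "" ++ final)))
    (PySem.Str.isIn "APPROVED" (PySem.Str.upper ((hypothesis.lookup "raw_content").getD "" ++ final)))
    (PySem.Str.isIn "FINAL" (PySem.Str.upper ((hypothesis.lookup "raw_content").getD "" ++ final)))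
    (PySem.Str.isIn "test" (PySem.Str.lower ((hypothesis.lookup "raw_content").getD "")))
    (PySem.Str.isIn "edit" (PySem.Str.lower ((hypothesis.lookup "raw_content").getD "" ++ final)))
    (PySem.Str.isIn "retroactive" (PySem.Str.lower ((hypothesis.lookup "raw_content").getD "" ++ final)))
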